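-- pv_equiv track=rewrite | github.com/Shiyizhuanshi/Personal | DiscreteMath_Week2_Class.py | sparse_matrix_to_CSR
-- ===== SOURCE A (Python) =====
-- def find_element(u, x):
--     index = []
--     for i in range(len(u)):
--         if u[i] == x:
--             index.append(i)
--     return index
--
-- def sparse_matrix_to_CSR(u, v):
--     index = []
--     for i in range(4):
--         index.append(find_element(u, i))
--     row = []
--     row_ele = []
--     for a in range(4):
--         for b in range(len(index[a])):
--             row_ele.append(v[index[a][b]])
--         row.append(row_ele)
--         row_ele = []
--     return row
-- ===== SOURCE B (Python) =====
-- def sparse_matrix_to_CSR(u, v):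
--     row = [[], [], [], []]
--     for i in range(len(u)):
--         if 0 <= u[i] < 4:
--             row[u[i]].append(v[i])
--     return row
-- ===== Notes on version B (the rewrite author's own statement) =====
-- stated objective: simpler
-- what changed: Replaces the four find_element scans over u plus a second bucket-filling pass with one preallocated 4-row table filled in a single pass that dispatches each v[i] to row[u[i]] when 0 <= u[i] < 4.
import Mathlib
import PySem

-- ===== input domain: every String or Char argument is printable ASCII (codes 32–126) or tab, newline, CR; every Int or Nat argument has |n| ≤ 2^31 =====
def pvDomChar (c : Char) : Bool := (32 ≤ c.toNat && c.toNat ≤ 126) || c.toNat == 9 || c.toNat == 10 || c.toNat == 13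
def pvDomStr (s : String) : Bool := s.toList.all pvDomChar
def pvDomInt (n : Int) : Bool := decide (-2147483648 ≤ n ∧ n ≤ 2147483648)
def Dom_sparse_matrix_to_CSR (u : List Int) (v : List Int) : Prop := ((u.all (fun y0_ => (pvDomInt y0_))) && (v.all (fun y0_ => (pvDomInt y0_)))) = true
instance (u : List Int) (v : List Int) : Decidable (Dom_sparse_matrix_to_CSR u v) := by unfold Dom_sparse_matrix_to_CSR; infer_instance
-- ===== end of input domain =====

-- B replaces A's four find_element scans + second bucket-filling pass by one single
-- distributing pass into a preallocated 4-row table (objective: simpler).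

-- ===== PORT A =====
-- v-access: Python's v[j]; inside Pre_ the index is always in range, getD 0 is a harmless total default
def pvVget (v : List Int) (j : Int) : Int := (PySem.List.pyGet? v j).getD 0
-- u[i] for an in-range Nat index (total default; every use is in range)
def pvAt (l : List Int) (i : Nat) : Int := l.getD i 0

def find_element (u : List Int) (x : Int) : List Int :=
  (List.range u.length).foldl (fun index i => if pvAt u i = x then index ++ [(i : Int)] else index) []

def sparse_matrix_to_CSR (u : List Int) (v : List Int) : List (List Int) :=
  let index := (List.range 4).foldl (fun idx (a : Nat) => idx ++ [find_element u (a : Int)]) []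
  (List.range 4).foldl (fun row a =>
    let ia := index.getD a []
    let row_ele := (List.range ia.length).foldl (fun re b => re ++ [pvVget v (pvAt ia b)]) []
    row ++ [row_ele]) []

-- ===== PORT B =====
def sparse_matrix_to_CSR_alt (u : List Int) (v : List Int) : List (List Int) :=
  (List.range u.length).foldl (fun row i =>
    let x := pvAt u i
    if 0 ≤ x ∧ x < 4 then row.modify x.toNat (fun r => r ++ [pvVget v (i : Int)]) else row)
    [[], [], [], []]

-- ===== PRECONDITION & SPEC =====
-- Pre_ excludes exactly the inputs where Python A raises IndexError: a position i with
-- 0 ≤ u[i] < 4 but i ≥ len(v) (then v[i] is read and is out of range).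
def Pre_sparse_matrix_to_CSR (u : List Int) (v : List Int) : Prop :=
  ∀ i ∈ List.range u.length, (0 ≤ pvAt u i ∧ pvAt u i < 4) → i < v.length
instance (u : List Int) (v : List Int) : Decidable (Pre_sparse_matrix_to_CSR u v) := by
  unfold Pre_sparse_matrix_to_CSR; infer_instance
def pvWitness_sparse_matrix_to_CSR : List Int × List Int := ([0, 5, 1, 0], [7, 8, 9, 10])

def Spec_sparse_matrix_to_CSR (u : List Int) (v : List Int) (out : List (List Int)) : Prop := out = sparse_matrix_to_CSR_alt u v
instance (u : List Int) (v : List Int) (out : List (List Int)) : Decidable (Spec_sparse_matrix_to_CSR u v out) := by unfold Spec_sparse_matrix_to_CSR; infer_instance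

-- ===== CLAIM (what is proved, stated in full; the proofs are below) =====
def Claim_equal_sparse_matrix_to_CSR : Prop := ∀ (u : List Int) (v : List Int), Dom_sparse_matrix_to_CSR u v → Pre_sparse_matrix_to_CSR u v → Spec_sparse_matrix_to_CSR u v (sparse_matrix_to_CSR u v)

-- ===== LEMMAS AND PROOFS =====

-- the canonical bucket: values of v at the positions where u holds x, in index order
def pvBucket (u v : List Int) (x : Int) (l : List Nat) : List Int :=
  ((l.filter (fun i => pvAt u i = x)).map (fun i : Nat => pvVget v (i : Int)))

theorem pv_foldl_filter_append {α β : Type} (p : α → Prop) [DecidablePred p] (g : α → β)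
    (l : List α) (acc : List β) :
    l.foldl (fun a i => if p i then a ++ [g i] else a) acc = acc ++ (l.filter (fun i => decide (p i))).map g := by
  induction l generalizing acc with
  | nil => simp
  | cons h t ih => by_cases hp : p h <;> simp [hp, ih]

theorem pv_foldl_append_map {α β : Type} (g : α → β) (l : List α) (acc : List β) :
    l.foldl (fun a i => a ++ [g i]) acc = acc ++ l.map g := by
  induction l generalizing acc with
  | nil => simp
  | cons h t ih => simp [ih]

theorem pv_range_map_getD {α β : Type} (l : List α) (d : α) (g : α → β) :
    (List.range l.length).map (fun b => g (l.getD b d)) = l.map g := by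
  apply List.ext_getElem
  · simp
  · intro i h1 h2
    simp only [List.getElem_map, List.getElem_range, List.getD_eq_getElem?_getD]
    rw [List.getElem?_eq_getElem (by simpa using h2)]
    simp

-- A's find_element lists exactly the matching positions (as Ints)
theorem pv_find_element_eq (u : List Int) (x : Int) :
    find_element u x = List.map (fun i : Nat => (i : Int)) ((List.range u.length).filter (fun i => decide (pvAt u i = x))) := by
  have h := pv_foldl_filter_append (fun i => pvAt u i = x) (fun i => (i : Int)) (List.range u.length) []
  simp only [List.nil_append] at h
  exact h

-- A's inner gather over a list of positions is map of pvVget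
theorem pv_gather_eq (v : List Int) (ia : List Int) :
    (List.range ia.length).foldl (fun re b => re ++ [pvVget v (pvAt ia b)]) [] = ia.map (pvVget v) := by
  rw [pv_foldl_append_map (fun b => pvVget v (pvAt ia b)) (List.range ia.length) []]
  simpa [pvAt] using pv_range_map_getD ia 0 (pvVget v)

theorem pv_A_eq (u v : List Int) :
    sparse_matrix_to_CSR u v =
      [pvBucket u v 0 (List.range u.length), pvBucket u v 1 (List.range u.length),
       pvBucket u v 2 (List.range u.length), pvBucket u v 3 (List.range u.length)] := by
  have h4 : List.range 4 = [0, 1, 2, 3] := by decide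
  unfold sparse_matrix_to_CSR
  simp only [h4, List.foldl_cons, List.foldl_nil, List.nil_append, List.cons_append,
    pv_gather_eq, pv_find_element_eq]
  simp only [pvBucket, List.map_map]
  simp [Function.comp_def]

theorem pv_modify0 (f : List Int → List Int) (r0 r1 r2 r3 : List Int) :
    List.modify [r0, r1, r2, r3] ((0 : Int).toNat) f = [f r0, r1, r2, r3] := rfl
theorem pv_modify1 (f : List Int → List Int) (r0 r1 r2 r3 : List Int) :
    List.modify [r0, r1, r2, r3] ((1 : Int).toNat) f = [r0, f r1, r2, r3] := rfl
theorem pv_modify2 (f : List Int → List Int) (r0 r1 r2 r3 : List Int) :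
    List.modify [r0, r1, r2, r3] ((2 : Int).toNat) f = [r0, r1, f r2, r3] := rfl
theorem pv_modify3 (f : List Int → List Int) (r0 r1 r2 r3 : List Int) :
    List.modify [r0, r1, r2, r3] ((3 : Int).toNat) f = [r0, r1, r2, f r3] := rfl

-- B's single-pass invariant
theorem pv_B_invariant (u v : List Int) (l : List Nat) (r0 r1 r2 r3 : List Int) :
    l.foldl (fun row i =>
      let x := pvAt u i
      if 0 ≤ x ∧ x < 4 then row.modify x.toNat (fun r => r ++ [pvVget v (i : Int)]) else row)
      [r0, r1, r2, r3] =
    [r0 ++ pvBucket u v 0 l, r1 ++ pvBucket u v 1 l, r2 ++ pvBucket u v 2 l, r3 ++ pvBucket u v 3 l] := by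
  induction l generalizing r0 r1 r2 r3 with
  | nil => simp [pvBucket]
  | cons i t ih =>
    rw [List.foldl_cons]
    by_cases hx : 0 ≤ pvAt u i ∧ pvAt u i < 4
    · have hcase : pvAt u i = 0 ∨ pvAt u i = 1 ∨ pvAt u i = 2 ∨ pvAt u i = 3 := by omega
      rw [if_pos hx]
      rcases hcase with h | h | h | h <;> rw [h] <;>
        first
        | (rw [pv_modify0, ih]; simp [pvBucket, h])
        | (rw [pv_modify1, ih]; simp [pvBucket, h])
        | (rw [pv_modify2, ih]; simp [pvBucket, h])
        | (rw [pv_modify3, ih]; simp [pvBucket, h])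
    · have h0 : ¬ pvAt u i = 0 := by omega
      have h1 : ¬ pvAt u i = 1 := by omega
      have h2 : ¬ pvAt u i = 2 := by omega
      have h3 : ¬ pvAt u i = 3 := by omega
      rw [if_neg hx]
      rw [ih]
      simp [pvBucket, h0, h1, h2, h3]

theorem pv_B_eq (u v : List Int) :
    sparse_matrix_to_CSR_alt u v =
      [pvBucket u v 0 (List.range u.length), pvBucket u v 1 (List.range u.length),
       pvBucket u v 2 (List.range u.length), pvBucket u v 3 (List.range u.length)] := by
  simpa using pv_B_invariant u v (List.range u.length) [] [] [] []

-- ===== VERDICT (by name: the statement is the Claim_ definition above) =====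
theorem sparse_matrix_to_CSR_spec : Claim_equal_sparse_matrix_to_CSR := by
  intro u v _ _
  unfold Spec_sparse_matrix_to_CSR
  rw [pv_A_eq, pv_B_eq]
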